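-- pv_equiv track=rewrite | github.com/c-morris/bgpy_pathsec | bgp_simulator_policies/policies/bgpsec_transitive.py | _partial_path_metric
-- ===== SOURCE A (Python) =====
-- def _partial_path_metric(partial, full):
--     """Count the number of non-adopting segments"""
--     i = 0
--     j = 0
--     switch = 0
--     segments = 0
--     if partial[0] != full[0]:
--         # count first segment
--         segments += 1
--     while i < len(partial) and j < len(full):
--         while partial[i] != full[j]:
--             segments += switch
--             switch = 0
--             j += 1
--             if j == len(full):
--                 return segments
--         switch = 1
--         i += 1
--         j += 1
--     if j < len(full):
--         # count last segment
--         segments += 1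
--     return segments
-- ===== SOURCE B (Python) =====
-- def _partial_path_metric(partial, full):
--     """Count the number of non-adopting segments"""
--     p = 0
--     adopting = []
--     for x in full:
--         if p < len(partial) and partial[p] == x:
--             adopting.append(True)
--             p += 1
--         else:
--             adopting.append(False)
--     segments = 0
--     prev = True
--     for a in adopting:
--         if prev and not a:
--             segments += 1
--         prev = a
--     return segments
-- ===== Notes on version B (the rewrite author's own statement) =====
-- stated objective: alternative
-- what changed: Replaces the nested while-loops with two pointers and a 'switch' flag by two independent passes: first build a boolean adopting-mask over full by greedy subsequence matching, then count maximal runs of False in the mask.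
import Mathlib
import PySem

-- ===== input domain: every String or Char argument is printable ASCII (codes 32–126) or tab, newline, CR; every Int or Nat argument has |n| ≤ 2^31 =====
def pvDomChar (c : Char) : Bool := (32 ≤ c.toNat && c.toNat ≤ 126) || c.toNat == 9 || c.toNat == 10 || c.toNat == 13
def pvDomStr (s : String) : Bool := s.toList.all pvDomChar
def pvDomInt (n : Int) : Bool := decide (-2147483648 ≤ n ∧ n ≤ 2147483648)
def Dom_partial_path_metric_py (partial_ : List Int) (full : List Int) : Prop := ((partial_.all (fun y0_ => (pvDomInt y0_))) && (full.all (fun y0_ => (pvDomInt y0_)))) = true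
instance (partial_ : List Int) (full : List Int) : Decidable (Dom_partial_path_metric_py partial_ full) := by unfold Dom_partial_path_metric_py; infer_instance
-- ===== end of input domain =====

-- B builds the greedy adopting-mask over full in one pass, then counts maximal runs of False
-- in a second pass, instead of A's nested while-loops with pointers and a 'switch' flag.

-- ===== PORT A =====
-- the nested while loops of A, with the early 'return segments' when j reaches len(full);
-- fuel = len(partial)+len(full)+1 is a totality guard only: it exceeds the loop's step count
def aLoop (partial_ full : List Int) (fuel : Nat) (i j : Nat) (switch segments : Int) : Int :=
  match fuel with
  | 0 => segments
  | fuel' + 1 =>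
    if i < partial_.length then
      if j < full.length then
        if partial_.getD i 0 ≠ full.getD j 0 then
          -- inner while step: segments += switch; switch = 0; j += 1; early return at j == len(full)
          if j + 1 = full.length then segments + switch
          else aLoop partial_ full fuel' i (j + 1) 0 (segments + switch)
        else aLoop partial_ full fuel' (i + 1) (j + 1) 1 segments
      else segments
    else if j < full.length then segments + 1 else segments

def partial_path_metric_py (partial_ : List Int) (full : List Int) : Int :=
  -- partial[0] / full[0] raise IndexError on empty input: excluded by Pre_
  let segments0 : Int := if partial_.getD 0 0 ≠ full.getD 0 0 then 1 else 0
  aLoop partial_ full (partial_.length + full.length + 1) 0 0 0 segments0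

-- ===== PORT B =====
-- first pass of Source B: greedy subsequence match of partial against full, mask over full
def bMask (partial_ : List Int) : List Int → Nat → List Bool
  | [], _ => []
  | x :: rest, p =>
    if p < partial_.length ∧ partial_.getD p 0 = x
    then true :: bMask partial_ rest (p + 1)
    else false :: bMask partial_ rest p

def partial_path_metric_py_alt (partial_ : List Int) (full : List Int) : Int :=
  let adopting := bMask partial_ full 0
  -- second pass of Source B: count maximal runs of False (state = (segments, prev))
  let st := adopting.foldl
    (fun (st : Int × Bool) a => (if st.2 && !a then st.1 + 1 else st.1, a)) (0, true)
  st.1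

-- ===== PRECONDITION & SPEC =====
-- Pre_ excludes empty partial or empty full, on which A raises IndexError at partial[0]/full[0].
def Pre_partial_path_metric_py (partial_ : List Int) (full : List Int) : Prop :=
  partial_ ≠ [] ∧ full ≠ []
instance (partial_ : List Int) (full : List Int) : Decidable (Pre_partial_path_metric_py partial_ full) := by unfold Pre_partial_path_metric_py; infer_instance
def pvWitness_partial_path_metric_py : List Int × List Int := ([1], [1])

def Spec_partial_path_metric_py (partial_ : List Int) (full : List Int) (out : Int) : Prop := out = partial_path_metric_py_alt partial_ full
instance (partial_ : List Int) (full : List Int) (out : Int) : Decidable (Spec_partial_path_metric_py partial_ full out) := by unfold Spec_partial_path_metric_py; infer_instance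

-- ===== CLAIM (what is proved, stated in full; the proofs are below) =====
def Claim_equal_partial_path_metric_py : Prop := ∀ (partial_ : List Int) (full : List Int), Dom_partial_path_metric_py partial_ full → Pre_partial_path_metric_py partial_ full → Spec_partial_path_metric_py partial_ full (partial_path_metric_py partial_ full)
-- ===== LEMMAS AND PROOFS =====

-- run count of a boolean list given the previous value (proof-side reformulation of Source B's 2nd loop)
def countRuns : List Bool → Bool → Int
  | [], _ => 0
  | a :: rest, prev => (if prev && !a then 1 else 0) + countRuns rest a

lemma foldl_countRuns (mask : List Bool) : ∀ (seg : Int) (prev : Bool),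
    (mask.foldl (fun (st : Int × Bool) a => (if st.2 && !a then st.1 + 1 else st.1, a)) (seg, prev)).1
      = seg + countRuns mask prev := by
  induction mask with
  | nil => intro seg prev; simp [countRuns]
  | cons a rest ih =>
    intro seg prev
    simp only [List.foldl_cons, countRuns, ih]
    cases prev <;> cases a <;> simp <;> omega

lemma bMask_exhausted (partial_ : List Int) : ∀ (l : List Int) (p : Nat),
    partial_.length ≤ p → bMask partial_ l p = List.replicate l.length false := by
  intro l
  induction l with
  | nil => intro p _; simp [bMask]
  | cons x rest ih =>
    intro p hp
    simp only [bMask, List.length_cons, List.replicate_succ]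
    rw [if_neg (by omega), ih p hp]

lemma countRuns_replicate_false (n : Nat) :
    countRuns (List.replicate n false) true = if n = 0 then 0 else 1 := by
  cases n with
  | zero => simp [countRuns]
  | succ m =>
    simp only [List.replicate_succ, countRuns, Nat.succ_ne_zero, if_false]
    have h : ∀ k, countRuns (List.replicate k false) false = 0 := by
      intro k
      induction k with
      | zero => simp [countRuns]
      | succ j ihj => simpa [List.replicate_succ, countRuns] using ihj
    simp [h m]

lemma aLoop_eq (partial_ full : List Int) :
    ∀ (fuel : Nat) (i j : Nat) (switch segments : Int),
      partial_.length - i + (full.length - j) < fuel →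
      j ≤ full.length →
      (switch = 1 ∨ i < partial_.length) → (switch = 0 ∨ switch = 1) →
      aLoop partial_ full fuel i j switch segments =
        segments + countRuns (bMask partial_ (full.drop j) i) (switch == 1) := by
  intro fuel
  induction fuel with
  | zero => intro i j switch segments hfuel; omega
  | succ fuel ih =>
    intro i j switch segments hfuel hj hswi hsw
    simp only [aLoop]
    by_cases hi : i < partial_.length
    · rw [if_pos hi]
      by_cases hjlt : j < full.length
      · rw [if_pos hjlt, List.drop_eq_getElem_cons hjlt]
        by_cases hne : partial_.getD i 0 ≠ full.getD j 0
        · -- mismatch: inner while step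
          rw [if_pos hne, bMask]
          rw [List.getD_eq_getElem full 0 hjlt] at hne
          have hcond : ¬(i < partial_.length ∧ partial_.getD i 0 = full[j]) :=
            fun hc => hne hc.2
          rw [if_neg hcond]
          by_cases hret : j + 1 = full.length
          · -- early return (j+1 = len full)
            rw [if_pos hret]
            have hnil : full.drop (j + 1) = [] := List.drop_eq_nil_of_le (by omega)
            rw [hnil]
            simp only [bMask, countRuns]
            rcases hsw with h | h <;> subst h <;> simp [countRuns]
          · rw [if_neg hret,
                ih i (j + 1) 0 (segments + switch) (by omega) (by omega) (Or.inr hi) (Or.inl rfl)]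
            simp only [countRuns]
            rcases hsw with h | h <;> subst h <;> simp [countRuns] <;> ring
        · -- match: i += 1, j += 1, switch = 1
          have heq : partial_.getD i 0 = full.getD j 0 := not_not.mp hne
          rw [if_neg hne,
              ih (i + 1) (j + 1) 1 segments (by omega) (by omega) (Or.inl rfl) (Or.inr rfl),
              bMask, if_pos ⟨hi, by rw [heq, List.getD_eq_getElem full 0 hjlt]⟩]
          simp only [countRuns]
          simp
      · -- j exhausted (while A still has partial left): loop exits, no trailing segment
        rw [if_neg hjlt]
        have hnil : full.drop j = [] := List.drop_eq_nil_of_le (by omega)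
        rw [hnil]; simp [bMask, countRuns]
    · rw [if_neg hi]
      by_cases hjlt : j < full.length
      · -- partial exhausted: trailing full elements form one non-adopting segment
        rw [if_pos hjlt]
        have hsw1 : switch = 1 := by
          rcases hswi with h | h
          · exact h
          · exact absurd h hi
        subst hsw1
        rw [bMask_exhausted partial_ _ i (by omega)]
        have hb : ((1 : Int) == 1) = true := rfl
        rw [hb, countRuns_replicate_false]
        simp only [List.length_drop]
        rw [if_neg (by omega)]
      · -- both exhausted
        rw [if_neg hjlt]
        have hnil : full.drop j = [] := List.drop_eq_nil_of_le (by omega)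
        rw [hnil]; simp [bMask, countRuns]

-- ===== VERDICT (by name: the statement is the Claim_ definition above) =====
theorem partial_path_metric_py_spec : Claim_equal_partial_path_metric_py := by
  unfold Claim_equal_partial_path_metric_py
  intro partial_ full _ hpre
  obtain ⟨hp, hf⟩ := hpre
  unfold Spec_partial_path_metric_py partial_path_metric_py partial_path_metric_py_alt
  have hplen : 0 < partial_.length := List.length_pos_of_ne_nil hp
  rw [aLoop_eq partial_ full (partial_.length + full.length + 1) 0 0 0 _ (by omega) (by omega) (Or.inr hplen) (Or.inl rfl)]
  rw [List.drop_zero, foldl_countRuns]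
  cases full with
  | nil => exact absurd rfl hf
  | cons f0 frest =>
    simp only [bMask, List.getD_cons_zero]
    by_cases h0 : partial_.getD 0 0 = f0
    · rw [if_neg (not_not_intro h0), if_pos ⟨hplen, h0⟩]
      simp [countRuns]
    · rw [if_pos h0, if_neg (fun hc => h0 hc.2)]
      simp only [countRuns]
      simp
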